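-- pv_equiv track=rewrite | github.com/ChagnonSebastien/Advent-of-Code-2020 | 2019/Day17/17-2.py | parse
-- ===== SOURCE A (Python) =====
-- def parse(message):
--     stream = []
--     for i in range(len(message)):
--         stream.append(message[i])
--         if i < len(message) - 1:
--             if not (message[i] >= 48 and message[i] < 58 and message[i+1] >= 48 and message[i+1] < 58):
--                 stream.append(44)
--
--     return stream + [10]
-- ===== SOURCE B (Python) =====
-- def parse(message):
--     # Phase 1: tokenize into maximal groups (a group extends while both the
--     # previous and current element are digit codes 48..57).
--     n = len(message)
--     groups = []
--     i = 0
--     while i < n: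
--         j = i + 1
--         while j < n and 48 <= message[j - 1] < 58 and 48 <= message[j] < 58:
--             j += 1
--         groups.append(message[i:j])
--         i = j
--     # Phase 2: join the groups with 44 separators, then terminate with 10.
--     if groups:
--         out = list(groups[0])
--         for g in groups[1:]:
--             out.append(44)
--             out.extend(g)
--     else:
--         out = []
--     out.append(10)
--     return out
-- ===== Notes on version B (the rewrite author's own statement) =====
-- stated objective: alternative
-- what changed: Replaces A's single index loop with inline lookahead commas by a two-phase decomposition: first scan out maximal digit-run groups as sublists, then join the materialized groups with 44 separators and append 10.
import Mathlib
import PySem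

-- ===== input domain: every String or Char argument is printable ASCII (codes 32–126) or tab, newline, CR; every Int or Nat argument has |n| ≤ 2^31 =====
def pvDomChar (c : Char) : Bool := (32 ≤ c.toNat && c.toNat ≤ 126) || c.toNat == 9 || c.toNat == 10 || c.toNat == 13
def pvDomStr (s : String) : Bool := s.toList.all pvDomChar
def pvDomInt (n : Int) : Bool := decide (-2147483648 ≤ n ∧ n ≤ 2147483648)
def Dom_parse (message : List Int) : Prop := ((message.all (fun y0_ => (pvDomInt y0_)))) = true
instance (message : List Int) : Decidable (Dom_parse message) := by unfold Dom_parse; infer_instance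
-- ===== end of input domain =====

-- B is a two-phase re-implementation (tokenize into maximal digit-run groups, then
-- join with 44 separators); A is the original one-pass lookahead loop. Equivalence proved on all inputs.

-- ===== PORT A =====
-- A walks the indices, appends each element, and after every non-final element
-- appends 44 unless that element and its successor are both digit codes.
-- Transliterated as the equivalent lookahead recursion over the list.
def parseStream : List Int → List Int
  | [] => []
  | [x] => [x]
  | x :: y :: rest =>
    (if 48 ≤ x ∧ x < 58 ∧ 48 ≤ y ∧ y < 58 then [x] else [x, 44]) ++ parseStream (y :: rest)

def parse (message : List Int) : List Int := parseStream message ++ [10]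

-- ===== PORT B =====
def isDig (x : Int) : Bool := 48 ≤ x && x < 58

-- inner while loop of B: collect the maximal run starting at x, return (run, remainder)
def takeRun : Int → List Int → List Int × List Int
  | x, [] => ([x], [])
  | x, y :: rest =>
    if isDig x && isDig y then
      let (r, t) := takeRun y rest
      (x :: r, t)
    else ([x], y :: rest)

theorem takeRun_snd_len : ∀ (rest : List Int) (x : Int), (takeRun x rest).2.length ≤ rest.length := by
  intro rest
  induction rest with
  | nil => intro x; simp [takeRun]
  | cons y t ih =>
    intro x
    simp only [takeRun]
    split
    · exact Nat.le_trans (ih y) (Nat.le_succ _)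
    · simp

-- outer while loop of B: the list of groups
def groupsOf : List Int → List (List Int)
  | [] => []
  | x :: rest => (takeRun x rest).1 :: groupsOf (takeRun x rest).2
termination_by l => l.length
decreasing_by
  simpa using Nat.lt_succ_of_le (takeRun_snd_len rest x)

-- phase 2 of B: join the groups with 44 separators
def joinGroups (gs : List (List Int)) : List Int :=
  match gs with
  | [] => []
  | g :: rest => rest.foldl (fun out h => out ++ (44 :: h)) g

def parse_alt (message : List Int) : List Int := joinGroups (groupsOf message) ++ [10]

-- ===== PRECONDITION & SPEC =====
def Spec_parse (message : List Int) (out : List Int) : Prop := out = parse_alt message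
instance (message : List Int) (out : List Int) : Decidable (Spec_parse message out) := by unfold Spec_parse; infer_instance

-- ===== CLAIM (what is proved, stated in full; the proofs are below) =====
def Claim_equal_parse : Prop := ∀ (message : List Int), Dom_parse message → Spec_parse message (parse message)

-- ===== LEMMAS AND PROOFS =====

theorem joinGroups_eq (gs : List (List Int)) :
    joinGroups gs = match gs with
      | [] => []
      | g :: rest => g ++ rest.flatMap (fun h => 44 :: h) := by
  cases gs with
  | nil => rfl
  | cons g rest => simp [joinGroups, List.flatMap_def]

theorem parseStream_run : ∀ (rest : List Int) (x : Int),
    parseStream (x :: rest) =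
      (takeRun x rest).1 ++
        (if (takeRun x rest).2 = [] then [] else 44 :: parseStream (takeRun x rest).2) := by
  intro rest
  induction rest with
  | nil => intro x; simp [parseStream, takeRun]
  | cons y t ih =>
    intro x
    by_cases h : (48 ≤ x ∧ x < 58 ∧ 48 ≤ y ∧ y < 58)
    · have hd : (isDig x && isDig y) = true := by
        simp [isDig]; omega
      simp only [parseStream, takeRun, hd, if_pos h]
      simp [ih y]
    · have hd : (isDig x && isDig y) = false := by
        simp [isDig]; omega
      simp [parseStream, takeRun, hd, if_neg h]

theorem parseStream_eq_join : ∀ (l : List Int), parseStream l = joinGroups (groupsOf l) := by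
  intro l
  induction l using groupsOf.induct with
  | case1 => simp [parseStream, groupsOf, joinGroups]
  | case2 x rest ih =>
    rw [parseStream_run, groupsOf, joinGroups_eq]
    cases ht : (takeRun x rest).2 with
    | nil =>
      simp [groupsOf]
    | cons w t' =>
      have hg : groupsOf ((w : Int) :: t') = (takeRun w t').1 :: groupsOf (takeRun w t').2 := by
        rw [groupsOf]
      rw [ht] at ih
      simp only [reduceCtorEq, if_false]
      rw [ih, hg, joinGroups_eq]
      simp

-- ===== VERDICT (by name: the statement is the Claim_ definition above) =====
theorem parse_spec : Claim_equal_parse := by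
  intro message _
  unfold Spec_parse parse parse_alt
  rw [parseStream_eq_join]
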